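-- pv_equiv track=rewrite | github.com/mudasirmohd/Shortmails | com/tse/summary_generator.py | get_cue_phrases
-- ===== SOURCE A (Python) =====
-- def get_cue_phrases(sentences):
--     cue_phrases = ['because', 'thus', 'conclusion', 'consequences', 'eventually',
--                    'hardly', 'therby', 'significant', 'therby', 'reason', 'summarize',
--                    'summarise', 'hence', 'plan']
--     cue_phrase_return = []
--     for sen in sentences:
--         cue_phrase_return.append(any([x in str(sen).lower() for x in cue_phrases]))
--     return cue_phrase_return
-- ===== SOURCE B (Python) =====
-- def get_cue_phrases(sentences):
--     cue_phrases = ['because', 'thus', 'conclusion', 'consequences', 'eventually',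
--                    'hardly', 'therby', 'significant', 'therby', 'reason', 'summarize',
--                    'summarise', 'hence', 'plan']
--
--     def has_cue(sen):
--         # single left-to-right scan: at each position test whether some cue starts there
--         t = str(sen).lower()
--         for i in range(len(t)):
--             if any(t.startswith(c, i) for c in cue_phrases):
--                 return True
--         return False
--
--     return [has_cue(sen) for sen in sentences]
-- ===== Notes on version B (the rewrite author's own statement) =====
-- stated objective: alternative
-- what changed: B scans each lowercased sentence once left-to-right, testing at every position whether some cue phrase starts there (one positional sweep), instead of A's 14 independent substring-containment searches per sentence.
import Mathlib
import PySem

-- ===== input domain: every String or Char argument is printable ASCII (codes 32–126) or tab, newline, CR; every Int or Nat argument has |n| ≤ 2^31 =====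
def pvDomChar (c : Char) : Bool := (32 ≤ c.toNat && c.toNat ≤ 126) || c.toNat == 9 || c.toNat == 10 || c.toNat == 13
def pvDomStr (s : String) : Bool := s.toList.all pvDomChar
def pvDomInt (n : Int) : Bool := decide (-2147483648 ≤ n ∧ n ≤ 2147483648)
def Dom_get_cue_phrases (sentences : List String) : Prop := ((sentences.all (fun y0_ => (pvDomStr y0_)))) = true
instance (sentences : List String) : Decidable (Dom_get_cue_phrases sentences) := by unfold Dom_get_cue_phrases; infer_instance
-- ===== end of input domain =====

-- B replaces A's 14 independent substring-containment tests per sentence by one left-to-right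
-- positional sweep of the lowercased sentence, testing at each position whether some cue starts there.

-- ===== PORT A =====
def pvCues : List String :=
  ["because", "thus", "conclusion", "consequences", "eventually",
   "hardly", "therby", "significant", "therby", "reason", "summarize",
   "summarise", "hence", "plan"]

def get_cue_phrases (sentences : List String) : List Bool :=
  sentences.foldl
    (fun acc sen =>
      acc ++ [(pvCues.map (fun x => PySem.Str.isIn x (PySem.Str.lower sen))).any id])
    []

-- ===== PORT B =====
def pvCuesChars : List (List Char) :=
  ["because".toList, "thus".toList, "conclusion".toList, "consequences".toList,
   "eventually".toList, "hardly".toList, "therby".toList, "significant".toList,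
   "therby".toList, "reason".toList, "summarize".toList, "summarise".toList,
   "hence".toList, "plan".toList]

-- one sweep over the positions of t: does some cue phrase start at the current position?
def pvScanCue (t : List Char) : Bool :=
  match t with
  | [] => false
  | c :: r => pvCuesChars.any (fun p => p.isPrefixOf (c :: r)) || pvScanCue r

def get_cue_phrases_alt (sentences : List String) : List Bool :=
  sentences.map (fun sen => pvScanCue (PySem.Str.lower sen).toList)

-- ===== PRECONDITION & SPEC =====
def Spec_get_cue_phrases (sentences : List String) (out : List Bool) : Prop := out = get_cue_phrases_alt sentences
instance (sentences : List String) (out : List Bool) : Decidable (Spec_get_cue_phrases sentences out) := by unfold Spec_get_cue_phrases; infer_instance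

-- ===== CLAIM (what is proved, stated in full; the proofs are below) =====
def Claim_equal_get_cue_phrases : Prop := ∀ (sentences : List String), Dom_get_cue_phrases sentences → Spec_get_cue_phrases sentences (get_cue_phrases sentences)

-- ===== LEMMAS AND PROOFS =====

lemma pv_isIn_eq_decide (x s : String) :
    PySem.Str.isIn x s = decide (x.toList <:+: s.toList) := by
  by_cases h : x.toList <:+: s.toList
  · rw [(PySem.Str.isIn_iff_infix x s).mpr h, decide_eq_true h]
  · rw [decide_eq_false h]
    cases hb : PySem.Str.isIn x s with
    | false => rfl
    | true => exact absurd ((PySem.Str.isIn_iff_infix x s).mp hb) h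

-- the positional sweep decides "some cue is an infix" (all cues are nonempty)
lemma pv_scan_eq (t : List Char) :
    pvScanCue t = pvCuesChars.any (fun p => decide (p <:+: t)) := by
  induction t with
  | nil => decide
  | cons c r ih =>
    rw [pvScanCue, ih]
    apply Bool.eq_iff_iff.mpr
    simp only [Bool.or_eq_true, List.any_eq_true, List.infix_cons_iff,
      List.isPrefixOf_iff_prefix, decide_eq_true_eq]
    constructor
    · rintro (⟨p, hp, h⟩ | ⟨p, hp, h⟩)
      · exact ⟨p, hp, Or.inl h⟩
      · exact ⟨p, hp, Or.inr h⟩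
    · rintro ⟨p, hp, h | h⟩
      · exact Or.inl ⟨p, hp, h⟩
      · exact Or.inr ⟨p, hp, h⟩

lemma pv_per_sentence (sen : String) :
    (pvCues.map (fun x => PySem.Str.isIn x (PySem.Str.lower sen))).any id
      = pvScanCue (PySem.Str.lower sen).toList := by
  rw [pv_scan_eq]
  have hcc : pvCuesChars = pvCues.map String.toList := by decide
  rw [hcc, List.any_map, List.any_map]
  simp only [Function.comp_def, id_eq, pv_isIn_eq_decide]

-- ===== VERDICT (by name: the statement is the Claim_ definition above) =====
theorem get_cue_phrases_spec : Claim_equal_get_cue_phrases := by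
  intro sentences _
  unfold Spec_get_cue_phrases get_cue_phrases get_cue_phrases_alt
  rw [PySem.List.foldl_append_singleton_eq_map]
  exact List.map_congr_left (fun sen _ => pv_per_sentence sen)
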